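/- GENERATED by mk_final_copies.py from the proof of the farm's unit `start_decoder.R1c` (farm:start_decoder.R1c.1: Proof.lean) as the
   re-elaboration sweep compiled it — do not edit. -/
import Asan.CheckWalk
import Vorbis.Spec.Units.start_decoder_R1c

open X86 X86.User Asan Vorbis Vorbis.Spec Vorbis.Spec.StartDecoder

set_option maxRecDepth 4000
set_option maxHeartbeats 4000000

namespace Vorbis.Spec.start_decoder_R1c

/-- **Segment R1c of `start_decoder`** (`cut232` 0x11592a … 0x115952 / 0x115957 … 0x115976): `f->residue_config = rax` (check site
0x115934: store8 at `f + 456`, inside `*f`; the store lies in `[f + Mid.hi 6, f + restFrom 7)`, a `MidWin`). rax = 0 (`AllocRet`'s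
failure arm): `error(f, 3)` (its footprint `[f + 140, f + 144)` is a `MidWin`), then `jmp 113b22`: `AtERR` with eax = 0 and `Failed`
from `Mid.failed` with `H2.of_null` / `H3.of_null` (the NULL that was just stored) and `Mid.h5_null`. rax ≠ 0 (`AllocRet.of_ne_zero`:
the new block, `Since A.1 A'.1`): the checked load of `residue_count` (0x11595e), `memset(block, 0, 32·rc)` — its precondition: the
block is the live object `A.1.newSetupObj (32·rc)` of the grown ghost; its footprint: the block itself, a YOUNG window
(`Young.of_since`) — and `AtR1c` at its return: the point by two `FInv.carry` / `Mid.carry` steps (the own store + pushes; the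
callee's footprint), `residue_config` = the block through `u_read` and the footprint, the zero bytes from memset's post. -/
theorem segR1c_walk {Lay : Layout} (hLay : Lay.hi = 0x1000000) {μ : Microarch} (hμ : UserX.MicroOK μ) {u₀ : State}
    (hcode : HasCodeNat Lay u₀ Vorbis.L.start_decoder.entry Vorbis.Code.code_start_decoder.nat Vorbis.L.start_decoder.size)
    (hstore8 : Asan.SmallCheck Lay μ Vorbis.WayInv (Vorbis.CodeOK u₀) [.rax, .rcx, .rdx] 8 Vorbis.L.__asan_store8_noabort.entry)
    (h_error : ∀ (others : List Obj) (frames : List (Nat × FrameLayout)),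
      Calls Lay μ Vorbis.WayInv (Vorbis.conv u₀) Vorbis.L.error.entry (Vorbis.Spec.error.spec others frames))
    (hload4 : Asan.SmallCheck Lay μ Vorbis.WayInv (Vorbis.CodeOK u₀) [.rax, .rcx, .rdx] 4 Vorbis.L.__asan_load4_noabort.entry)
    (h_memset : ∀ (others : List Obj) (frames : List (Nat × FrameLayout)),
      Calls Lay μ Vorbis.WayInv (Vorbis.conv u₀) Vorbis.L.memset.entry (Vorbis.Spec.memset.spec others frames))
    {g : Ghost} {v : State} {A A' : Arena × List Obj} {rc : Nat} (hb : BodyR1b u₀ g A A' rc v) :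
    ReachVia Lay μ WayInv v (fun w => AtR1c u₀ g w ∨ AtERR u₀ g w) := by
  have hpt := hb.pt
  have hfr := hpt.frame
  have hh := hpt.hand
  have hm := hpt.mid
  have hp : Pos g A' := hpt.pos
  have hlo := hb.rc_lo
  have hhi := hb.rc_hi
  have he := hfr.entry
  v_entry he
  obtain ⟨hRa, hR8⟩ := hfr.r_eq
  simp only [steady, Ghost.RA] at hRa
  simp only [depth] at he_room he_stack
  have hflo := hp.f_lo
  have hf2 := hp.f_hi
  have hf3 := hp.f_stack
  simp only [Ghost.RA] at hf3
  have hRn : (addr g.R).toNat = g.R := toNat_addr _ (by omega)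
  have hfn : (addr g.f).toNat = g.f := toNat_addr _ (by omega)
  have w_rip := hfr.rip
  have c_rsp := hfr.rsp
  have c_rbp := hpt.rbp
  have w_eq : Mem.EqOn Vorbis.L.textLo Vorbis.L.textHi u₀.mem v.mem := hfr.code
  have hdf : v.flags .df = false := (show abiInv _ from hfr.inv).1
  have hmx : v.mxcsr &&& 0x1F80 = 0x1F80 := (show abiInv _ from hfr.inv).2
  have hsse := Vorbis.sseOK_of_abiInv hfr.inv
  have herr := h_error A'.2 g.frames'
  have hms := h_memset A'.2 g.frames'
  have a1 := hm.arena.AR1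
  -- `residue_count`, as the four bytes the load at 0x115963 reads
  have hcntv : v.mem.readLE (addr g.f + 320) 4 = rc := by
    have hu := hb.count
    simp only [vacc, voff] at hu
    rw [Mem.i32_def] at hu
    have hlt := Mem.u32_lt v.mem (g.f + 320)
    have hc := sint32_cases (v.mem.u32 (g.f + 320))
    have hn : v.mem.u32 (g.f + 320) = rc := by omega
    unfold Mem.u32 at hn
    rw [← addr_add_lit] at hn
    exact hn
  have e1 : Mid.hi 6 = 320 := by decide
  have e2 : restFrom 7 = 464 := by decide
  u_walk hcode [hμ.vendor] until [Vorbis.L.start_decoder.cut234, Vorbis.L.start_decoder.cut4] span [Vorbis.L.textLo, Vorbis.L.textHi] side (v_side)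
  case check_115934 =>
    -- 0x115934: the store of `f->residue_config` (f + 456) lies inside `*f`
    have hun : ShadowUntouched v.mem s_115934.mem := by v_untouched
    refine (hh.obj.mono (frames'_sub g A'.2)).accSmall hfr.shadow hun _ 8 (by decide) (by u_omega) ?_
    simp only [Off.sizeof.stb_vorbis]
    u_omega
  case check_11595e =>
    -- 0x11595e: the load of `f->residue_count` (f + 320)
    have hun : ShadowUntouched v.mem s_11595e.mem := by v_untouched
    refine (hh.obj.mono (frames'_sub g A'.2)).accSmall hfr.shadow hun _ 4 (by decide) (by u_omega) ?_
    simp only [Off.sizeof.stb_vorbis]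
    u_omega
  case call_inv => v_inv
  case pre_115976 =>
    -- 0x115976: `memset(residue_config, 0, 32·rc)`: the new block is a live object of the grown ghost
    have hun : ShadowUntouched v.mem s_115976.mem := by v_untouched
    have hne : v.reg .rax ≠ 0 := by
      intro e
      apply hbr_115943
      rw [e]
      rfl
    obtain ⟨hrax, hA', _⟩ := hb.alloc.of_ne_zero hne
    have e5 : (5 : UInt64).toNat % 64 = 5 := by decide
    have hrdx : (s_115976.reg .rdx).toNat = 32 * rc := by
      rw [w_rdx, cnt32_sext_bv rc (by omega), UInt64.toNat_shiftLeft, UInt64.toNat_ofNat', e5, Nat.shiftLeft_eq]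
      omega
    refine ⟨shadowPre_call hfr (by rw [w_rsp]; u_omega) hun, Or.inr ?_⟩
    rw [w_rdi, hrdx, hrax]
    refine ⟨A.1.newSetupObj (32 * rc), List.mem_append_right _ ?_, Nat.le_refl _, Nat.le_refl _⟩
    rw [hA']
    exact List.mem_cons_self
  case call_inv => v_inv
  case pre_11594d =>
    -- 0x11594d: `error(f, VORBIS_outofmem)`
    have hun : ShadowUntouched v.mem s_11594d.mem := by v_untouched
    refine ⟨shadowPre_call hfr (by rw [w_rsp]; u_omega) hun, ?_⟩
    rw [w_rdi, hfn]
    exact hh.obj.mono (frames'_sub g A'.2)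
  case cont =>
    -- THE SUCCESS ARM: the returned state of memset (0x11597b = cut234)
    have hne : v.reg .rax ≠ 0 := by
      intro e
      apply hbr_115943
      rw [e]
      rfl
    obtain ⟨hrax, hA', hsince⟩ := hb.alloc.of_ne_zero hne
    have e5 : (5 : UInt64).toNat % 64 = 5 := by decide
    have hrdx : (s_115976.reg .rdx).toNat = 32 * rc := by
      rw [w_rdx_115976, cnt32_sext_bv rc (by omega), UInt64.toNat_shiftLeft, UInt64.toNat_ofNat', e5,
        Nat.shiftLeft_eq]
      omega
    have hrdi : (s_115976.reg .rdi).toNat = A.1.B + (A.1.S + 32) := by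
      rw [w_rdi_115976]
      exact hrax
    have hspn : (s_115976.reg .rsp).toNat = g.R - 8 := by
      rw [w_rsp_115976]
      u_omega
    -- where the new block is: inside the arena's buffer
    have hin := arena_inside hm.arena hsince.1
    simp only [] at hin
    have p7 := hp.objOut
    have p9 := hp.ar_lo
    have p10 := hp.ar_hi
    have p11 := hp.ar_stack
    -- step A: the own store of `residue_config` and the pushed return addresses (cut232 → the call state)
    have hunA : ShadowUntouched v.mem s_115976.mem := by v_untouched
    have hsA : Mem.SameExcept [⟨g.R - 8, g.R⟩, ⟨g.f + 456, g.f + 464⟩] v.mem s_115976.mem := by u_same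
    have hwsA : ∀ w, w ∈ [(⟨g.R - 8, g.R⟩ : Span), ⟨g.f + 456, g.f + 464⟩] → MidWin g 6 7 A.1 A' w := by
      intro w hw
      simp only [List.mem_cons, List.mem_nil_iff, or_false] at hw
      unfold MidWin
      rcases hw with rfl | rfl
      · left
        simp only []
        omega
      · right; right; right; right; right; left
        rw [e1, e2]
        simp only []
        omega
    have hbitsA : Bits (g.Blk A') g.len s_115976.mem g.f := by
      apply bits_kept hp hm.bits hsA
      intro w hw
      simp only [List.mem_cons, List.mem_nil_iff, or_false] at hw
      rcases hw with rfl | rfl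
      · left
        simp only []
        omega
      · right; right; left
        simp only []
        omega
    have hfA : FInv g A' s_115976.mem := (FInv.of hfr).carry hp hsA hunA (fun w hw => (hwsA w hw).secWin)
    have hmA : Mid g 6 6 7 A.1 A' s_115976.mem := hm.carry hp hsA hunA hwsA hbitsA
    -- step B: memset's footprint (its frame, the new block)
    have hsB := w_same
    simp only [X86.User.Spec.footprint, vspec] at hsB
    rw [hrdi, hrdx, hspn] at hsB
    have hunB : ShadowUntouched s_115976.mem s_115976r.mem := w_post.2.1
    have hwsB : ∀ w, w ∈ [(⟨g.R - 8 - 64, g.R - 8⟩ : Span),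
        ⟨A.1.B + (A.1.S + 32), A.1.B + (A.1.S + 32) + 32 * rc⟩] → MidWin g 6 7 A.1 A' w := by
      intro w hw
      simp only [List.mem_cons, List.mem_nil_iff, or_false] at hw
      rcases hw with rfl | rfl
      · unfold MidWin
        left
        simp only []
        omega
      · unfold MidWin
        right; right; right; right; right; right; right; right; right
        exact Young.of_since hmA.arena hm.extc hsince ⟨Nat.le_refl _, Nat.le_refl _⟩
    have hbitsB : Bits (g.Blk A') g.len s_115976r.mem g.f := by
      apply bits_kept hp hmA.bits hsB
      intro w hw
      simp only [List.mem_cons, List.mem_nil_iff, or_false] at hw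
      rcases hw with rfl | rfl
      · left
        simp only []
        omega
      · right; left
        simp only []
        omega
    have hfB : FInv g A' s_115976r.mem := hfA.carry hp hsB hunB (fun w hw => (hwsB w hw).secWin)
    have hmB : Mid g 6 6 7 A.1 A' s_115976r.mem := hmA.carry hp hsB hunB hwsB hbitsB
    have hrbp : s_115976r.reg .rbp = addr g.f := by
      rw [w_kept.get .rbp rfl]
      exact c_rbp
    have hptB : SecPt u₀ g Vorbis.L.start_decoder.cut234 6 6 7 A.1 A' s_115976r :=
      ⟨hfB.frame hfr w_rip w_rsp (Vorbis.conv_code_eqOn w_code) w_inv hfr.offText hfr.ext, hh, hmB, hrbp⟩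
    -- `residue_count` is untouched by both steps
    have hcount : stb_vorbis.residue_count s_115976r.mem g.f = (rc : Int) := by
      rw [← hb.count]
      simp only [vacc, voff]
      have eA : Mem.EqOn (g.f + 320) (g.f + 324) v.mem s_115976.mem := by
        apply hsA.eqOn
        intro w hw
        simp only [List.mem_cons, List.mem_nil_iff, or_false] at hw
        rcases hw with rfl | rfl <;> simp only [] <;> omega
      have eB : Mem.EqOn (g.f + 320) (g.f + 324) s_115976.mem s_115976r.mem := by
        apply hsB.eqOn
        intro w hw
        simp only [List.mem_cons, List.mem_nil_iff, or_false] at hw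
        rcases hw with rfl | rfl <;> simp only [] <;> omega
      rw [eB.i32 (g.f + 320) (by omega) (by omega) (by omega), eA.i32 (g.f + 320) (by omega) (by omega) (by omega)]
    -- `residue_config` holds the new block's address
    have ea : (addr g.f + 456).toNat = g.f + 456 := by u_omega
    have hcfg0 : s_115976.mem.readLE (addr g.f + 456) 8 = (v.reg .rax).toNat := by
      rw [w_mem_115976]
      u_read
    have hcfg : stb_vorbis.residue_config s_115976r.mem g.f = A.1.B + (A.1.S + 32) := by
      simp only [vacc, voff]
      unfold Mem.u64
      rw [← addr_add_lit, ← hrax, ← hcfg0]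
      apply hsB.readLE (addr g.f + 456) 8 (by omega)
      intro w hw
      simp only [List.mem_cons, List.mem_nil_iff, or_false] at hw
      rcases hw with rfl | rfl <;> simp only [] <;> rw [ea] <;> omega
    -- the bytes of the block are 0 (memset's post)
    have hzero : ∀ j, j < 32 * rc →
        s_115976r.mem.u8 (stb_vorbis.residue_config s_115976r.mem g.f + j) = 0 := by
      intro j hj
      rw [hcfg]
      have hz := w_post.2.2 j (by rw [hrdx]; exact hj)
      have ersi : (s_115976.reg .rsi).toNat % 256 = 0 := by
        rw [w_rsi_115976]
        rfl
      rw [ersi] at hz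
      have eaddr : s_115976.reg .rdi + UInt64.ofNat j = addr (A.1.B + (A.1.S + 32) + j) := by
        rw [eq_addr (s_115976.reg .rdi) _ hrdi, addr_add]
      rw [eaddr] at hz
      exact hz
    have hsince' : Since A.1 A'.1 ⟨stb_vorbis.residue_config s_115976r.mem g.f, 32 * rc⟩ := by
      rw [hcfg]
      exact hsince
    exact ReachVia.done (Or.inl ⟨A.1, A', rc, hptB, hcount, hlo, hhi, hsince', hzero⟩)
  case cont =>
    -- THE FAILURE ARM: the returned state of `error` (0x115952), then `jmp 113b22`
    have hspn : (s_11594d.reg .rsp).toNat = g.R - 8 := by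
      rw [w_rsp_11594d]
      u_omega
    have hrdi : (s_11594d.reg .rdi).toNat = g.f := by
      rw [w_rdi_11594d]
      exact hfn
    -- step A: the own store of `residue_config = 0` and the pushed return addresses
    have hunA : ShadowUntouched v.mem s_11594d.mem := by v_untouched
    have hsA : Mem.SameExcept [⟨g.R - 8, g.R⟩, ⟨g.f + 456, g.f + 464⟩] v.mem s_11594d.mem := by u_same
    have hwsA : ∀ w, w ∈ [(⟨g.R - 8, g.R⟩ : Span), ⟨g.f + 456, g.f + 464⟩] → MidWin g 6 7 A.1 A' w := by
      intro w hw
      simp only [List.mem_cons, List.mem_nil_iff, or_false] at hw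
      unfold MidWin
      rcases hw with rfl | rfl
      · left
        simp only []
        omega
      · right; right; right; right; right; left
        rw [e1, e2]
        simp only []
        omega
    have hbitsA : Bits (g.Blk A') g.len s_11594d.mem g.f := by
      apply bits_kept hp hm.bits hsA
      intro w hw
      simp only [List.mem_cons, List.mem_nil_iff, or_false] at hw
      rcases hw with rfl | rfl
      · left
        simp only []
        omega
      · right; right; left
        simp only []
        omega
    have hfA : FInv g A' s_11594d.mem := (FInv.of hfr).carry hp hsA hunA (fun w hw => (hwsA w hw).secWin)
    have hmA : Mid g 6 6 7 A.1 A' s_11594d.mem := hm.carry hp hsA hunA hwsA hbitsA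
    -- step B: `error`'s footprint (its frame, `f->error`)
    have hsB := w_same
    simp only [X86.User.Spec.footprint, vspec] at hsB
    rw [hrdi, hspn] at hsB
    have hunB : ShadowUntouched s_11594d.mem s_11594dr.mem := w_post.2.1
    have hwsB : ∀ w, w ∈ [(⟨g.R - 8 - 48, g.R - 8⟩ : Span), ⟨g.f + 140, g.f + 140 + 4⟩] → MidWin g 6 7 A.1 A' w := by
      intro w hw
      simp only [List.mem_cons, List.mem_nil_iff, or_false] at hw
      unfold MidWin
      rcases hw with rfl | rfl
      · left
        simp only []
        omega
      · right; right; right; right; left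
        simp only []
        omega
    have hbitsB : Bits (g.Blk A') g.len s_11594dr.mem g.f := by
      apply bits_kept hp hmA.bits hsB
      intro w hw
      simp only [List.mem_cons, List.mem_nil_iff, or_false] at hw
      rcases hw with rfl | rfl
      · left
        simp only []
        omega
      · right; right; left
        simp only []
        omega
    have hfB : FInv g A' s_11594dr.mem := hfA.carry hp hsB hunB (fun w hw => (hwsB w hw).secWin)
    have hmB : Mid g 6 6 7 A.1 A' s_11594dr.mem := hmA.carry hp hsB hunB hwsB hbitsB
    -- `residue_config = NULL` was stored (rax = 0) and `error` does not write it
    have ea : (addr g.f + 456).toNat = g.f + 456 := by u_omega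
    have hcfg0 : s_11594d.mem.readLE (addr g.f + 456) 8 = (v.reg .rax).toNat := by
      rw [w_mem_11594d]
      u_read
    have hcfg : stb_vorbis.residue_config s_11594dr.mem g.f = 0 := by
      simp only [vacc, voff]
      unfold Mem.u64
      rw [← addr_add_lit, ← hbr_115943, ← hcfg0]
      apply hsB.readLE (addr g.f + 456) 8 (by omega)
      intro w hw
      simp only [List.mem_cons, List.mem_nil_iff, or_false] at hw
      rcases hw with rfl | rfl <;> simp only [] <;> rw [ea] <;> omega
    -- `error` returns 0 (a register fact of the returned state: the second walk carries it as `w_rax`)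
    have hrax0 : s_11594dr.reg .rax = 0 := w_post.1
    have hfailed : Failed g.len g.f (g.Live A') A' s_11594dr.mem :=
      hmB.failed (by omega) (H2.of_null hcfg) (H3.of_null hcfg) (hmB.h5_null (by omega) _)
    -- the second walk: 0x115952 `jmp 113b22`
    v_after_call w_rsp_11594d w_mem_11594d
    u_walk hcode [hμ.vendor] until [Vorbis.L.start_decoder.cut4] span [Vorbis.L.textLo, Vorbis.L.textHi] side (v_side)
    -- 0x113b22: the memory is that of the returned state of `error`, eax = 0
    have habi : abiInv s_115952 := by
      refine Vorbis.abiInv_of ?_ ?_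
      · rw [w_flags]
        exact w_df
      · rw [w_mxcsr]
        exact w_mx
    have hfE : FInv g A' s_115952.mem := by
      rw [w_mem]
      exact hfB
    have hfrE : Frame u₀ g pc_ERR A' s_115952 := hfE.frame hfr w_rip w_rsp w_eq habi hfr.offText hfr.ext
    have hfailedE : Failed g.len g.f (g.Live A') A' s_115952.mem := by
      rw [w_mem]
      exact hfailed
    refine ReachVia.done (Or.inr ⟨A', hfrE, hh, Or.inl ⟨?_, hfailedE⟩⟩)
    rw [w_rax]
    rfl

end Vorbis.Spec.start_decoder_R1c

/-- The unit `start_decoder.R1c`: `segR1c_walk` at every entry state. -/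
theorem Vorbis.Spec.Worked.start_decoder_R1c_ok : Vorbis.Spec.start_decoder_R1c.Statement := by
  intro Lay hLay μ hμ u₀ hcode hstore8 h_error hload4 h_memset g v hat
  obtain ⟨A, A', rc, hb⟩ := hat
  exact Vorbis.Spec.start_decoder_R1c.segR1c_walk hLay hμ hcode hstore8 h_error hload4 h_memset hb
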